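-- pv_equiv track=rewrite | github.com/polltter/share | Twitter/GetTweets.py | get_competitors
-- ===== SOURCE A (Python) =====
-- def get_competitors(company):
--
--     List_Stream = ['Netflix', 'Hulu', 'AmazonPrime', 'Showtime', 'HBO', 'Disney+'
--                    , 'YoutubeTV', 'Youtube']
--
--     List_Phone = ['Apple', 'Samsung', 'Huawei', 'Nokia', 'Sony', 'LG', 'Motorola']
--
--     List_Computer = ['Apple', 'HP', 'Dell', 'Lenovo', 'Asus', 'Acer', 'Microsoft', 'Samsung']
--
--     List_FastFood = ['McDonald\'s', 'Burger King', 'Wendy\'s', 'KFC', 'Subway', 'Taco Bell']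
--
--
--
--     List_Competitors = []
--     Flat_List_Of_Competitors = []
--
--     for i in range(0,len(List_Stream)):
--
--         if List_Stream[i] == company:
--             List_Stream.remove(List_Stream[i])
--             List_Competitors.append(List_Stream)
--             break
--         else:
--             continue
--
--     for i in range(0,len(List_Phone)):
--
--         if List_Phone[i] == company:
--             List_Phone.remove(List_Phone[i])
--             List_Competitors.append(List_Phone)
--             break
--         else:
--             continue
--
--     for i in range(0,len(List_Computer)):
--
--         if List_Computer[i] == company:
--             List_Computer.remove(List_Computer[i])
--             List_Competitors.append(List_Computer)
--             break
--         else: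
--             continue
--
--     for i in range(0,len(List_FastFood)):
--
--         if List_FastFood[i] == company:
--             List_FastFood.remove(List_FastFood[i])
--             List_Competitors.append(List_FastFood)
--             break
--         else:
--             continue
--
--     ### Transformar o que pode ser uma lista de listas numa só lista
--
--     Flat_List_Of_Competitors = [x for l in List_Competitors for x in l]
--
--     ### Remover duplicados
--     Distinct_Competitors=[]
--
--     for i in Flat_List_Of_Competitors:
--         if i in Distinct_Competitors:
--             continue
--         else:
--             Distinct_Competitors.append(i)
--
--
--
--
--     return Distinct_Competitors
-- ===== SOURCE B (Python) =====
-- def get_competitors(company):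
--     categories = [
--         ['Netflix', 'Hulu', 'AmazonPrime', 'Showtime', 'HBO', 'Disney+',
--          'YoutubeTV', 'Youtube'],
--         ['Apple', 'Samsung', 'Huawei', 'Nokia', 'Sony', 'LG', 'Motorola'],
--         ['Apple', 'HP', 'Dell', 'Lenovo', 'Asus', 'Acer', 'Microsoft', 'Samsung'],
--         ["McDonald's", 'Burger King', "Wendy's", 'KFC', 'Subway', 'Taco Bell'],
--     ]
--     result = []
--     seen = set()
--     for cat in categories:
--         if company in cat:
--             for c in cat:
--                 if c != company and c not in seen:
--                     seen.add(c)
--                     result.append(c)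
--     return result
-- ===== Notes on version B (the rewrite author's own statement) =====
-- stated objective: simpler
-- what changed: Replaces A's four index/remove/break search loops plus a separate flatten comprehension and a dedup loop with one fused pass over a single list of categories, appending each non-company, not-yet-seen element directly to the result (seen tracked with a set).
import Mathlib
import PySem

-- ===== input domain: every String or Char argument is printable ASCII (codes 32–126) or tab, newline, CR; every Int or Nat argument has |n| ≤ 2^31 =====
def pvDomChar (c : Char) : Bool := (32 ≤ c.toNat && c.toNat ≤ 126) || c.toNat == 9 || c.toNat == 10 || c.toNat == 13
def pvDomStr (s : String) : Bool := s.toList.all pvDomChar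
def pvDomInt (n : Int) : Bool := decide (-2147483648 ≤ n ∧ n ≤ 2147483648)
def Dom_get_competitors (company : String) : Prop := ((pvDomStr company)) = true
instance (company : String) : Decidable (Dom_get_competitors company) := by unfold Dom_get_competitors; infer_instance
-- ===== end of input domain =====

-- B fuses A's four search/remove/break loops, the flatten comprehension and the dedup loop
-- into one pass over a list of categories with a seen-set (objective: simpler).

-- ===== PORT A =====
-- one 'for i in range(0,len(cat)): if cat[i]==company: cat.remove(cat[i]); comps.append(cat); break'
def pvAStep (company : String) (cat : List String)
    (st : Bool × List (List String)) (i : Int) : Bool × List (List String) :=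
  match st with
  | (true, acc) => (true, acc)           -- loop already broken
  | (false, acc) =>
    match PySem.List.pyGet? cat i with
    | none => (false, acc)               -- unreachable: i ranges over valid indices
    | some x =>
      if x == company then
        (true, acc ++ [(PySem.List.remove? cat x).getD cat])
      else (false, acc)

def pvALoop (company : String) (cat : List String) (comps : List (List String)) : List (List String) :=
  ((PySem.List.pyRange 0 (Int.ofNat cat.length) 1).foldl (pvAStep company cat) (false, comps)).2

def get_competitors (company : String) : List String :=
  let listStream := ["Netflix", "Hulu", "AmazonPrime", "Showtime", "HBO", "Disney+", "YoutubeTV", "Youtube"]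
  let listPhone := ["Apple", "Samsung", "Huawei", "Nokia", "Sony", "LG", "Motorola"]
  let listComputer := ["Apple", "HP", "Dell", "Lenovo", "Asus", "Acer", "Microsoft", "Samsung"]
  let listFastFood := ["McDonald's", "Burger King", "Wendy's", "KFC", "Subway", "Taco Bell"]
  let comps := pvALoop company listStream []
  let comps := pvALoop company listPhone comps
  let comps := pvALoop company listComputer comps
  let comps := pvALoop company listFastFood comps
  let flat := comps.flatMap (fun l => l)
  flat.foldl (fun dist i => if dist.contains i then dist else dist ++ [i]) []

-- ===== PORT B =====
def pvBCat (company : String) (st : PySem.Set String × List String) (cat : List String) :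
    PySem.Set String × List String :=
  if cat.contains company then
    cat.foldl
      (fun (st : PySem.Set String × List String) c =>
        if c != company && !(PySem.Set.contains st.1 c) then
          (PySem.Set.add st.1 c, st.2 ++ [c])
        else st)
      st
  else st

def get_competitors_alt (company : String) : List String :=
  let categories : List (List String) :=
    [["Netflix", "Hulu", "AmazonPrime", "Showtime", "HBO", "Disney+", "YoutubeTV", "Youtube"],
     ["Apple", "Samsung", "Huawei", "Nokia", "Sony", "LG", "Motorola"],
     ["Apple", "HP", "Dell", "Lenovo", "Asus", "Acer", "Microsoft", "Samsung"],
     ["McDonald's", "Burger King", "Wendy's", "KFC", "Subway", "Taco Bell"]]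
  (categories.foldl (pvBCat company) (PySem.Set.empty, [])).2

-- ===== PRECONDITION & SPEC =====
def Spec_get_competitors (company : String) (out : List String) : Prop := out = get_competitors_alt company
instance (company : String) (out : List String) : Decidable (Spec_get_competitors company out) := by unfold Spec_get_competitors; infer_instance

-- ===== CLAIM (what is proved, stated in full; the proofs are below) =====
def Claim_equal_get_competitors : Prop := ∀ (company : String), Dom_get_competitors company → Spec_get_competitors company (get_competitors company)

-- ===== LEMMAS AND PROOFS =====

-- ===== VERDICT (by name: the statement is the Claim_ definition above) =====
-- appended lemmas draft
lemma pvAStep_not_mem (company : String) (cat : List String) (comps : List (List String))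
    (i : Int) (h : company ∉ cat) : pvAStep company cat (false, comps) i = (false, comps) := by
  unfold pvAStep
  cases hg : PySem.List.pyGet? cat i with
  | none => rfl
  | some x =>
    have hx : x ∈ cat := PySem.List.mem_of_pyGet?_eq_some cat hg
    have hb : (x == company) = false := by
      simp only [beq_eq_false_iff_ne]; rintro rfl; exact h hx
    simp [hb]

lemma pvALoop_not_mem (company : String) (cat : List String) (comps : List (List String))
    (h : company ∉ cat) : pvALoop company cat comps = comps := by
  unfold pvALoop
  suffices H : ∀ l : List Int,
      (l.foldl (pvAStep company cat) (false, comps)) = (false, comps) by rw [H]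
  intro l
  induction l with
  | nil => rfl
  | cons i l ih => rw [List.foldl_cons, pvAStep_not_mem company cat comps i h]; exact ih

lemma pvBCat_not_mem (company : String) (st : PySem.Set String × List String)
    (cat : List String) (h : company ∉ cat) : pvBCat company st cat = st := by
  unfold pvBCat
  simp [List.contains_eq_mem, h]

theorem get_competitors_spec : Claim_equal_get_competitors := by
  intro company _
  unfold Spec_get_competitors
  by_cases h : company ∈ (["Netflix", "Hulu", "AmazonPrime", "Showtime", "HBO", "Disney+",
      "YoutubeTV", "Youtube", "Apple", "Samsung", "Huawei", "Nokia", "Sony", "LG", "Motorola",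
      "HP", "Dell", "Lenovo", "Asus", "Acer", "Microsoft",
      "McDonald's", "Burger King", "Wendy's", "KFC", "Subway", "Taco Bell"] : List String)
  · fin_cases h <;> decide
  · simp only [List.mem_cons, List.not_mem_nil, or_false, not_or] at h
    obtain ⟨h1,h2,h3,h4,h5,h6,h7,h8,h9,h10,h11,h12,h13,h14,h15,h16,h17,h18,h19,h20,h21,h22,h23,h24,h25,h26,h27⟩ := h
    have ns : company ∉ (["Netflix", "Hulu", "AmazonPrime", "Showtime", "HBO", "Disney+", "YoutubeTV", "Youtube"] : List String) := by
      simp_all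
    have np : company ∉ (["Apple", "Samsung", "Huawei", "Nokia", "Sony", "LG", "Motorola"] : List String) := by
      simp_all
    have nc : company ∉ (["Apple", "HP", "Dell", "Lenovo", "Asus", "Acer", "Microsoft", "Samsung"] : List String) := by
      simp_all
    have nf : company ∉ (["McDonald's", "Burger King", "Wendy's", "KFC", "Subway", "Taco Bell"] : List String) := by
      simp_all
    show get_competitors company = get_competitors_alt company
    simp only [get_competitors, get_competitors_alt]
    rw [pvALoop_not_mem _ _ _ ns, pvALoop_not_mem _ _ _ np,
        pvALoop_not_mem _ _ _ nc, pvALoop_not_mem _ _ _ nf]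
    simp [pvBCat_not_mem _ _ _ ns, pvBCat_not_mem _ _ _ np,
          pvBCat_not_mem _ _ _ nc, pvBCat_not_mem _ _ _ nf]
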